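-- pv_equiv track=rewrite | github.com/helldragger/TP_INFO_S3 | TP_reseaux/simulation.py | couche1R_man
-- ===== SOURCE A (Python) =====
-- def couche1R_man(trame_de_bits):
--     res = ""
--     temp = ""
--     for bit_i in range(len(trame_de_bits)):
--         temp += trame_de_bits[bit_i]
--         if len(temp) == 2:
--             if temp == "-+":
--                 res += "0"
--                 temp = ""
--             elif temp == "+-":
--                 res += "1"
--                 temp = ""
--             else:
--                 temp = temp[1:]
--
--     return res
-- ===== SOURCE B (Python) =====
-- def couche1R_man(trame_de_bits):
--     res = []
--     i = 0
--     n = len(trame_de_bits)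
--     while i + 1 < n:
--         pair = trame_de_bits[i] + trame_de_bits[i + 1]
--         if pair == "-+":
--             res.append("0")
--             i += 2
--         elif pair == "+-":
--             res.append("1")
--             i += 2
--         else:
--             i += 1
--     return "".join(res)
-- ===== Notes on version B (the rewrite author's own statement) =====
-- stated objective: simpler
-- what changed: Replaces A's per-character sliding two-char buffer with a direct index scan that matches the pair at the current position and jumps two on a match (one on a mismatch), collecting digits in a list joined once.
import Mathlib
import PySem

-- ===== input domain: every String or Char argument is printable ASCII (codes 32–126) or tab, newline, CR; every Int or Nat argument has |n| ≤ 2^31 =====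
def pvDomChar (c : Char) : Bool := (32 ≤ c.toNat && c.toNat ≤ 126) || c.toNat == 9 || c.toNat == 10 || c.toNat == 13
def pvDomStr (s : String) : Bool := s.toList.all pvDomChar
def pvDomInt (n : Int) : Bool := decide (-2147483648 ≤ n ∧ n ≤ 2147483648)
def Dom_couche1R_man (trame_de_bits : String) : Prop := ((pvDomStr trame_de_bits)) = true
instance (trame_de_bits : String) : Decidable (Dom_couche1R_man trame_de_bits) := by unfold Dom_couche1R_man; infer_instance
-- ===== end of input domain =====

-- B replaces A's per-character sliding-buffer loop by a direct pair-matching index scan (same O(n) cost; objective: simpler).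

-- ===== PORT A =====
-- A slides a 2-char buffer over the stream: on "-+" emit '0', on "+-" emit '1', else drop the buffer's first char.
def manStepA (st : List Char × List Char) (c : Char) : List Char × List Char :=
  let temp := st.2 ++ [c]
  if temp.length = 2 then
    if temp = ['-', '+'] then (st.1 ++ ['0'], [])
    else if temp = ['+', '-'] then (st.1 ++ ['1'], [])
    else (st.1, temp.drop 1)
  else (st.1, temp)

def couche1R_man (trame_de_bits : String) : String :=
  String.ofList (trame_de_bits.toList.foldl manStepA ([], [])).1

-- ===== PORT B =====
-- B: index scan — match the pair at the current position, jump two on a match, one otherwise.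
def manScan : List Char → List Char
  | c1 :: c2 :: rest =>
    if c1 = '-' ∧ c2 = '+' then '0' :: manScan rest
    else if c1 = '+' ∧ c2 = '-' then '1' :: manScan rest
    else manScan (c2 :: rest)
  | _ => []
termination_by l => l.length

def couche1R_man_alt (trame_de_bits : String) : String :=
  String.ofList (manScan trame_de_bits.toList)

-- ===== PRECONDITION & SPEC =====
def Spec_couche1R_man (trame_de_bits : String) (out : String) : Prop := out = couche1R_man_alt trame_de_bits
instance (trame_de_bits : String) (out : String) : Decidable (Spec_couche1R_man trame_de_bits out) := by unfold Spec_couche1R_man; infer_instance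

-- ===== CLAIM (what is proved, stated in full; the proofs are below) =====
def Claim_equal_couche1R_man : Prop := ∀ (trame_de_bits : String), Dom_couche1R_man trame_de_bits → Spec_couche1R_man trame_de_bits (couche1R_man trame_de_bits)

-- ===== LEMMAS AND PROOFS =====
theorem manFold_eq_scan (l : List Char) : ∀ (temp res : List Char), temp.length ≤ 1 →
    (List.foldl manStepA (res, temp) l).1 = res ++ manScan (temp ++ l) := by
  induction l with
  | nil =>
    intro temp res h
    match temp, h with
    | [], _ => simp [manScan]
    | [a], _ => simp [manScan]
  | cons c l ih =>
    intro temp res h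
    match temp, h with
    | [], _ =>
      have := ih [c] res (by simp)
      simpa [manStepA] using this
    | [a], _ =>
      by_cases h1 : a = '-' ∧ c = '+'
      · obtain ⟨rfl, rfl⟩ := h1
        have := ih [] (res ++ ['0']) (by simp)
        simpa [manStepA, manScan] using this
      · by_cases h2 : a = '+' ∧ c = '-'
        · obtain ⟨rfl, rfl⟩ := h2
          have := ih [] (res ++ ['1']) (by simp)
          simpa [manStepA, manScan, h1] using this
        · have := ih [c] res (by simp)
          have hne1 : ¬ ([a, c] = ['-', '+']) := by simp; intro ha hc; exact h1 ⟨ha, hc⟩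
          have hne2 : ¬ ([a, c] = ['+', '-']) := by simp; intro ha hc; exact h2 ⟨ha, hc⟩
          have hs : manScan (a :: c :: l) = manScan (c :: l) := by
            rw [manScan]; simp [h1, h2]
          simpa [manStepA, hne1, hne2, hs] using this

-- ===== VERDICT (by name: the statement is the Claim_ definition above) =====
theorem couche1R_man_spec : Claim_equal_couche1R_man := by
  intro s _
  unfold Spec_couche1R_man couche1R_man couche1R_man_alt
  rw [manFold_eq_scan s.toList [] [] (by simp)]
  simp
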